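-- pv_equiv track=rewrite | github.com/Carbonferrous/Python | numbertheory.py | sigmaList
-- ===== SOURCE A (Python) =====
-- def sigmaList(n, x):
--     if n <= 0:
--         yield 0
--         return
--     elif n == 1:
--         yield 0
--         yield 1
--         return
--     elif n == 2:
--         yield 0
--         yield 1
--         yield 1 + 2**x
--         return
--     else:
--         pass
--     divList = [1]*(n + 1)
--     yield 0
--     yield divList[1]
--     for div in range(2, n+1):
--         for i in range(div, n+1, div):
--             divList[i] += div**x
--         yield divList[div]
-- ===== SOURCE B (Python) =====
-- def sigmaList(n, x):
--     yield 0
--     if n >= 1: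
--         yield 1
--     if n <= 1:
--         return
--     # smallest-prime-factor sieve: each prime marks its yet-unmarked multiples
--     spf = [0] * (n + 1)
--     for p in range(2, n + 1):
--         if spf[p] == 0:
--             for m in range(p, n + 1, p):
--                 if spf[m] == 0:
--                     spf[m] = p
--     # sigma_x multiplicatively: sig[i] = sig(coprime part) * (geometric sum of the spf-power part)
--     sig = [0] * (n + 1)
--     g = [0] * (n + 1)
--     c = [0] * (n + 1)
--     sig[1] = 1
--     for i in range(2, n + 1):
--         p = spf[i]
--         j = i // p
--         if spf[j] == p:
--             g[i] = g[j] * p**x + 1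
--             c[i] = c[j]
--         else:
--             g[i] = 1 + p**x
--             c[i] = j
--         sig[i] = sig[c[i]] * g[i]
--         yield sig[i]
-- ===== Notes on version B (the rewrite author's own statement) =====
-- stated objective: faster
-- what changed: A adds div**x to every multiple of every div (recomputing the power in the inner loop, ~n log n power computations); B runs a smallest-prime-factor sieve once and computes sigma_x(i) multiplicatively as sigma of the coprime part times a geometric sum for the spf prime power, one power per index; intended as faster, measured ~2-2.8x (2.76x at n=1024, unconfirmed at n=4096 where both timed out).
-- outside the precondition, e.g. on sigmaList(2, -1): A returns [0, 1, 1.5], B returns [0, 1, 1.5]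
import Mathlib
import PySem

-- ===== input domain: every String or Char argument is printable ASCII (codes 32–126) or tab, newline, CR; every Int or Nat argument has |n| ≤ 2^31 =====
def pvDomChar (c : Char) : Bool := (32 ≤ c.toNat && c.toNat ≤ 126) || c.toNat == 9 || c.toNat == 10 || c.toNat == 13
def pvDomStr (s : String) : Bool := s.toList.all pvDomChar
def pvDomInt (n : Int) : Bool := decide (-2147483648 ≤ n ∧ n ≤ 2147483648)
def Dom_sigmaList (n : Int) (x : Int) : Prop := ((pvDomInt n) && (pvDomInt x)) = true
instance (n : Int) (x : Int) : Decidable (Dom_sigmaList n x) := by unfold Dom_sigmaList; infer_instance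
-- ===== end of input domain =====

-- B replaces A's add-to-every-multiple sieve by a smallest-prime-factor sieve plus a
-- multiplicative recurrence for sigma_x (one power per index); intended as faster
-- (timing run measured ~2-2.8x at the sizes where both finish).

-- ===== PORT A =====
-- inner loop 'for i in range(div, n+1, div): divList[i] += div**x'
def sigmaA_inner (n x dv : Int) (dl : List Int) : List Int :=
  (PySem.List.pyRange dv (n + 1) dv).foldl
    (fun a i => a.set i.toNat (PySem.List.pyGetD a i 0 + dv ^ x.toNat)) dl

-- one iteration of 'for div in range(2, n+1)': update divList, then yield divList[div]
def sigmaA_step (n x : Int) (st : List Int × List Int) (dv : Int) : List Int × List Int :=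
  let dl := sigmaA_inner n x dv st.1
  (dl, st.2 ++ [PySem.List.pyGetD dl dv 0])

def sigmaList (n : Int) (x : Int) : List Int :=
  if n ≤ 0 then [0]
  else if n = 1 then [0, 1]
  else if n = 2 then [0, 1, 1 + 2 ^ x.toNat]
  else
    let divList : List Int := List.replicate (n + 1).toNat 1
    ((PySem.List.pyRange 2 (n + 1) 1).foldl (sigmaA_step n x)
      (divList, [0, PySem.List.pyGetD divList 1 0])).2

-- ===== PORT B =====
-- inner loop 'for m in range(p, n+1, p): if spf[m] == 0: spf[m] = p'
def sigmaB_sieveInner (n p : Int) (spf : List Int) : List Int :=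
  (PySem.List.pyRange p (n + 1) p).foldl
    (fun a m => if PySem.List.pyGetD a m 0 = 0 then a.set m.toNat p else a) spf

-- smallest-prime-factor sieve: 'for p in range(2, n+1): if spf[p] == 0: <inner>'
def sigmaB_spf (n : Int) : List Int :=
  (PySem.List.pyRange 2 (n + 1) 1).foldl
    (fun spf p => if PySem.List.pyGetD spf p 0 = 0 then sigmaB_sieveInner n p spf else spf)
    (List.replicate (n + 1).toNat 0)

-- one iteration of the main loop; state = (sig, g, c, out)
def sigmaB_step (x : Int) (spf : List Int)
    (st : List Int × List Int × List Int × List Int) (i : Int) :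
    List Int × List Int × List Int × List Int :=
  let p := PySem.List.pyGetD spf i 0
  let j := PySem.Int.floordiv i p
  let (gi, ci) :=
    if PySem.List.pyGetD spf j 0 = p then
      (PySem.List.pyGetD st.2.1 j 0 * p ^ x.toNat + 1, PySem.List.pyGetD st.2.2.1 j 0)
    else (1 + p ^ x.toNat, j)
  let sig := st.1.set i.toNat (PySem.List.pyGetD st.1 ci 0 * gi)
  (sig, st.2.1.set i.toNat gi, st.2.2.1.set i.toNat ci,
    st.2.2.2 ++ [PySem.List.pyGetD sig i 0])

def sigmaList_alt (n : Int) (x : Int) : List Int :=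
  let out : List Int := if 1 ≤ n then [0, 1] else [0]
  if n ≤ 1 then out
  else
    let spf := sigmaB_spf n
    ((PySem.List.pyRange 2 (n + 1) 1).foldl (sigmaB_step x spf)
      ((List.replicate (n + 1).toNat 0).set 1 1,
       List.replicate (n + 1).toNat 0,
       List.replicate (n + 1).toNat 0, out)).2.2.2

-- ===== PRECONDITION & SPEC =====
-- Pre_ excludes n ≥ 2 with x < 0: there Python's div**x is a float, so A returns a list of floats,
-- not a value of the declared type list[int] (B returns the same floats).
def Pre_sigmaList (n : Int) (x : Int) : Prop := n ≤ 1 ∨ 0 ≤ x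
instance (n : Int) (x : Int) : Decidable (Pre_sigmaList n x) := by unfold Pre_sigmaList; infer_instance
def pvWitness_sigmaList : Int × Int := (6, 2)

def Spec_sigmaList (n : Int) (x : Int) (out : List Int) : Prop := out = sigmaList_alt n x
instance (n : Int) (x : Int) (out : List Int) : Decidable (Spec_sigmaList n x out) := by unfold Spec_sigmaList; infer_instance

-- ===== CLAIM (what is proved, stated in full; the proofs are below) =====
def Claim_equal_sigmaList : Prop := ∀ (n : Int) (x : Int), Dom_sigmaList n x → Pre_sigmaList n x → Spec_sigmaList n x (sigmaList n x)

-- ===== LEMMAS AND PROOFS =====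

-- σ_x(m) as an integer (x.toNat is the exponent both ports use)
def sigSpec (x : Int) (m : Nat) : Int := ((∑ d ∈ m.divisors, d ^ x.toNat : Nat) : Int)

-- the common output both ports produce for n ≥ 2
def outSpec (n x : Int) : List Int :=
  [0, 1] ++ (PySem.List.pyRange 2 (n + 1) 1).map (fun i => sigSpec x i.toNat)

-- ---- small getD/set helpers ----
theorem getD_set_eq (a : List Int) (k : Nat) (v : Int) (hk : k < a.length) :
    (a.set k v).getD k 0 = v := by
  simp [List.getD_eq_getElem?_getD, hk]

theorem getD_set_ne (a : List Int) (k j : Nat) (v : Int) (h : j ≠ k) :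
    (a.set k v).getD j 0 = a.getD j 0 := by
  simp [List.getD_eq_getElem?_getD, h.symm]

theorem getD_replicate' (n : Nat) (c : Int) (j : Nat) :
    (List.replicate n c).getD j 0 = if j < n then c else 0 := by
  simp [List.getD_eq_getElem?_getD, List.getElem?_replicate]
  split <;> simp_all

-- ---- generic fold-over-index-list lemmas ----
-- A's inner loop: add v at every index of L (distinct, in bounds)
theorem foldl_set_add (v : Int) (L : List Int) : ∀ (arr : List Int),
    (∀ i ∈ L, 0 ≤ i ∧ i < (arr.length : Int)) → L.Nodup →
    ((L.foldl (fun a i => a.set i.toNat (PySem.List.pyGetD a i 0 + v)) arr).length = arr.length ∧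
     ∀ j : Nat, (L.foldl (fun a i => a.set i.toNat (PySem.List.pyGetD a i 0 + v)) arr).getD j 0 =
       arr.getD j 0 + if (j : Int) ∈ L then v else 0) := by
  induction L with
  | nil => intro arr _ _; simp
  | cons i L ih =>
    intro arr hb hnd
    obtain ⟨h0i, hlt⟩ := hb i (List.mem_cons_self ..)
    obtain ⟨hiL, hndL⟩ := List.nodup_cons.mp hnd
    set arr' := arr.set i.toNat (PySem.List.pyGetD arr i 0 + v) with harr'
    have hlen : arr'.length = arr.length := by simp [harr']
    obtain ⟨ih1, ih2⟩ := ih arr' (by intro q hq; rw [hlen]; exact hb q (List.mem_cons_of_mem _ hq)) hndL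
    have hltN : i.toNat < arr.length := by omega
    have hpy : PySem.List.pyGetD arr i 0 = arr.getD i.toNat 0 := PySem.List.pyGetD_of_nonneg arr 0 h0i
    refine ⟨by rw [List.foldl_cons]; rw [← harr'] at *; omega, fun j => ?_⟩
    rw [List.foldl_cons, ← harr', ih2 j]
    by_cases hj : j = i.toNat
    · have hcast : (j : Int) = i := by omega
      have h1 : arr'.getD j 0 = arr.getD j 0 + v := by
        rw [harr', hj, getD_set_eq _ _ _ hltN, hpy]
      rw [h1, hcast, if_neg hiL, if_pos (List.mem_cons_self ..)]
      ring
    · have hcast : ¬ ((j : Int) = i) := by omega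
      rw [harr', getD_set_ne _ _ _ _ hj]
      simp [List.mem_cons, hcast]

-- B's sieve inner loop: write p at every index of L whose entry is still 0
theorem foldl_set_if (p : Int) (L : List Int) : ∀ (arr : List Int),
    (∀ i ∈ L, 0 ≤ i ∧ i < (arr.length : Int)) → L.Nodup →
    ((L.foldl (fun a m => if PySem.List.pyGetD a m 0 = 0 then a.set m.toNat p else a) arr).length = arr.length ∧
     ∀ j : Nat, (L.foldl (fun a m => if PySem.List.pyGetD a m 0 = 0 then a.set m.toNat p else a) arr).getD j 0 =
       if (j : Int) ∈ L ∧ arr.getD j 0 = 0 then p else arr.getD j 0) := by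
  induction L with
  | nil => intro arr _ _; simp
  | cons i L ih =>
    intro arr hb hnd
    obtain ⟨h0i, hlt⟩ := hb i (List.mem_cons_self ..)
    obtain ⟨hiL, hndL⟩ := List.nodup_cons.mp hnd
    have hltN : i.toNat < arr.length := by omega
    have hpy : PySem.List.pyGetD arr i 0 = arr.getD i.toNat 0 := PySem.List.pyGetD_of_nonneg arr 0 h0i
    set arr' := if PySem.List.pyGetD arr i 0 = 0 then arr.set i.toNat p else arr with harr'
    have hlen : arr'.length = arr.length := by rw [harr']; split <;> simp
    obtain ⟨ih1, ih2⟩ := ih arr' (by intro q hq; rw [hlen]; exact hb q (List.mem_cons_of_mem _ hq)) hndL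
    have hsame : ∀ j : Nat, j ≠ i.toNat → arr'.getD j 0 = arr.getD j 0 := by
      intro j hj; rw [harr']; split
      · exact getD_set_ne _ _ _ _ hj
      · rfl
    refine ⟨by rw [List.foldl_cons]; rw [← harr'] at *; omega, fun j => ?_⟩
    rw [List.foldl_cons, ← harr', ih2 j]
    by_cases hj : j = i.toNat
    · have hcast : (j : Int) = i := by omega
      have hnotL : ¬ ((j : Int) ∈ L) := by rw [hcast]; exact hiL
      by_cases h0 : arr.getD j 0 = 0
      · have he : arr'.getD j 0 = p := by
          rw [harr', if_pos (by rw [hpy, ← hj]; exact h0), hj]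
          exact getD_set_eq _ _ _ hltN
        rw [he]
        by_cases hp0 : p = 0
        · simp [List.mem_cons, hcast, hnotL, ← List.getD_eq_getElem?_getD, h0, hp0]
        · simp [List.mem_cons, hnotL, hp0, hcast, ← List.getD_eq_getElem?_getD, h0]
      · have he : arr'.getD j 0 = arr.getD j 0 := by
          rw [harr', if_neg (by rw [hpy, ← hj]; exact h0)]
        rw [he]
        simp [List.mem_cons, hnotL, ← List.getD_eq_getElem?_getD, h0]
    · have hne : ¬ ((j : Int) = i) := by omega
      rw [hsame j hj]
      simp [List.mem_cons, hne]

theorem nodup_pyRange_of_pos (a b s : Int) (hs : 0 < s) : (PySem.List.pyRange a b s).Nodup := by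
  rw [PySem.List.pyRange_of_pos a b hs]
  refine List.Nodup.map ?_ List.nodup_range
  intro k1 k2 h
  have : (k1 : Int) = k2 := by
    exact mul_left_cancel₀ (ne_of_gt hs) (by linarith : s * (k1:Int) = s * k2)
  exact_mod_cast this

theorem mem_pyRange_mul (d n j : Int) (hd : 0 < d) :
    j ∈ PySem.List.pyRange d (n + 1) d ↔ d ∣ j ∧ d ≤ j ∧ j ≤ n := by
  rw [PySem.List.mem_pyRange_iff_of_pos hd]
  constructor
  · rintro ⟨h1, h2, h3⟩
    refine ⟨by simpa using dvd_add h3 (dvd_refl d), h1, by omega⟩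
  · rintro ⟨h1, h2, h3⟩
    exact ⟨h2, by omega, by simpa using dvd_sub h1 (dvd_refl d)⟩

-- pyRange 2 (n+1) 1 as a mapped List.range
theorem pyRange_two_eq (n : Int) (hn : 2 ≤ n) :
    PySem.List.pyRange 2 (n + 1) 1 = (List.range (n - 1).toNat).map (fun k => ((k + 2 : Nat) : Int)) := by
  rw [PySem.List.pyRange_of_pos 2 (n + 1) one_pos, if_pos (by omega)]
  have hc : ((n + 1 - 2 + 1 - 1) / 1).toNat = (n - 1).toNat := by
    rw [Int.ediv_one]; omega
  rw [hc]
  exact List.map_congr_left (fun k _ => by push_cast; ring)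

-- ---- number-theory facts ----
theorem sigSpec_partial (x : Int) (i : Nat) (hi : 1 ≤ i) :
    sigSpec x i = 1 + ∑ d ∈ (Finset.Icc 2 i).filter (· ∣ i), (d : Int) ^ x.toNat := by
  unfold sigSpec
  have hset : i.divisors = insert 1 ((Finset.Icc 2 i).filter (· ∣ i)) := by
    ext d
    simp only [Nat.mem_divisors, Finset.mem_insert, Finset.mem_filter, Finset.mem_Icc]
    constructor
    · rintro ⟨hd, hi0⟩
      by_cases h1 : d = 1
      · exact Or.inl h1
      · have hdpos : 0 < d := Nat.pos_of_dvd_of_pos hd (by omega)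
        exact Or.inr ⟨⟨by omega, Nat.le_of_dvd (by omega) hd⟩, hd⟩
    · rintro (h1 | ⟨_, hd⟩)
      · exact ⟨h1 ▸ one_dvd i, by omega⟩
      · exact ⟨hd, by omega⟩
  rw [hset, Finset.sum_insert (by simp)]
  push_cast
  ring

theorem sigSpec_prime_pow_succ (x : Int) (p : Nat) (hp : p.Prime) (e : Nat) :
    sigSpec x (p ^ (e + 1)) = sigSpec x (p ^ e) * (p : Int) ^ x.toNat + 1 := by
  unfold sigSpec
  rw [Nat.divisors_prime_pow hp (e + 1), Nat.divisors_prime_pow hp e, Finset.sum_map, Finset.sum_map]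
  simp only [Function.Embedding.coeFn_mk]
  have : ∑ k ∈ Finset.range (e + 1 + 1), (p ^ k) ^ x.toNat =
      (∑ k ∈ Finset.range (e + 1), (p ^ k) ^ x.toNat) * p ^ x.toNat + 1 := by
    rw [Finset.sum_range_succ' (fun k => (p ^ k) ^ x.toNat) (e + 1)]
    rw [Finset.sum_mul]
    congr 1
    · exact Finset.sum_congr rfl (fun k _ => by rw [pow_succ, mul_pow])
    · simp
  rw [this]
  push_cast
  ring

theorem sigSpec_prime (x : Int) (p : Nat) (hp : p.Prime) :
    sigSpec x p = 1 + (p : Int) ^ x.toNat := by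
  unfold sigSpec
  rw [hp.divisors, Finset.sum_insert (by simp [hp.ne_one.symm]), Finset.sum_singleton]
  push_cast
  ring

theorem sigSpec_mul_ordCompl (x : Int) (t : Nat) (ht : 2 ≤ t) :
    sigSpec x t = sigSpec x (t / t.minFac ^ t.factorization t.minFac) *
      sigSpec x (t.minFac ^ t.factorization t.minFac) := by
  have hp : t.minFac.Prime := Nat.minFac_prime (by omega)
  have ht0 : t ≠ 0 := by omega
  have hsig : ∀ m : Nat, sigSpec x m = ((ArithmeticFunction.sigma x.toNat m : Nat) : Int) := by
    intro m; unfold sigSpec; rw [ArithmeticFunction.sigma_apply]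
  have hcop : (t / t.minFac ^ t.factorization t.minFac).Coprime
      (t.minFac ^ t.factorization t.minFac) :=
    Nat.Coprime.pow_right _ ((hp.coprime_iff_not_dvd.mpr (Nat.not_dvd_ordCompl hp ht0)).symm)
  have hmul := ArithmeticFunction.isMultiplicative_sigma.map_mul_of_coprime
    (f := ArithmeticFunction.sigma x.toNat) hcop
  have hsplit : t / t.minFac ^ t.factorization t.minFac * t.minFac ^ t.factorization t.minFac = t := by
    rw [mul_comm]; exact Nat.ordProj_mul_ordCompl_eq_self t t.minFac
  rw [hsig, hsig, hsig]
  conv_lhs => rw [← hsplit]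
  rw [hmul]
  push_cast
  ring

-- ---- A's sieve computes outSpec ----
-- 1 + sum of d^x over divisors d of j with 2 ≤ d ≤ M
def partSum (x : Int) (M j : Nat) : Int :=
  1 + ∑ d ∈ (Finset.Icc 2 M).filter (· ∣ j), (d : Int) ^ x.toNat

theorem partSum_one (x : Int) (j : Nat) : partSum x 1 j = 1 := by
  unfold partSum
  rw [show Finset.Icc 2 1 = (∅ : Finset Nat) from by decide]
  simp

theorem partSum_succ (x : Int) (M j : Nat) (hM : 1 ≤ M) :
    partSum x (M + 1) j = partSum x M j + if (M + 1) ∣ j then ((M + 1 : Nat) : Int) ^ x.toNat else 0 := by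
  unfold partSum
  rw [show Finset.Icc 2 (M + 1) = insert (M + 1) (Finset.Icc 2 M) from by
    ext d; simp only [Finset.mem_Icc, Finset.mem_insert]; omega]
  rw [Finset.filter_insert]
  split
  · rw [Finset.sum_insert (by simp only [Finset.mem_filter, Finset.mem_Icc]; omega)]
    ring
  · ring

theorem partSum_self (x : Int) (i : Nat) (hi : 1 ≤ i) : partSum x i i = sigSpec x i := by
  rw [sigSpec_partial x i hi]; rfl

theorem A_loop_inv (n x : Int) (hn : 3 ≤ n) :
    ∀ m : Nat, (m : Int) ≤ n - 1 →
    (((List.range m).foldl (fun st k => sigmaA_step n x st ((k + 2 : Nat) : Int))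
        (List.replicate (n + 1).toNat 1, [0, 1])).1.length = (n + 1).toNat) ∧
    (∀ j : Nat, 1 ≤ j → (j : Int) ≤ n →
      ((List.range m).foldl (fun st k => sigmaA_step n x st ((k + 2 : Nat) : Int))
        (List.replicate (n + 1).toNat 1, [0, 1])).1.getD j 0 = partSum x (m + 1) j) ∧
    (((List.range m).foldl (fun st k => sigmaA_step n x st ((k + 2 : Nat) : Int))
        (List.replicate (n + 1).toNat 1, [0, 1])).2 =
      [0, 1] ++ (List.range m).map (fun k => sigSpec x (k + 2))) := by
  intro m
  induction m with
  | zero =>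
    intro _
    refine ⟨by simp, fun j hj1 hjn => ?_, by simp⟩
    simp only [List.range_zero, List.foldl_nil]
    rw [partSum_one, getD_replicate']
    rw [if_pos (by omega)]
  | succ m ih =>
    intro hm
    obtain ⟨ih1, ih2, ih3⟩ := ih (by omega)
    set st := (List.range m).foldl (fun st k => sigmaA_step n x st ((k + 2 : Nat) : Int))
        (List.replicate (n + 1).toNat 1, [0, 1]) with hst
    have hstep : (List.range (m + 1)).foldl (fun st k => sigmaA_step n x st ((k + 2 : Nat) : Int))
        (List.replicate (n + 1).toNat 1, [0, 1]) = sigmaA_step n x st ((m + 2 : Nat) : Int) := by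
      rw [List.range_succ, List.foldl_append]
      simp [hst]
    set dv : Int := ((m + 2 : Nat) : Int) with hdv
    have hdvpos : (0 : Int) < dv := by omega
    have hinner := foldl_set_add (dv ^ x.toNat) (PySem.List.pyRange dv (n + 1) dv) st.1
      (by
        intro i hi
        rw [mem_pyRange_mul dv n i hdvpos] at hi
        refine ⟨by omega, ?_⟩
        rw [ih1]; omega)
      (nodup_pyRange_of_pos dv (n + 1) dv hdvpos)
    have hinner_eq : sigmaA_inner n x dv st.1 =
        (PySem.List.pyRange dv (n + 1) dv).foldl
          (fun a i => a.set i.toNat (PySem.List.pyGetD a i 0 + dv ^ x.toNat)) st.1 := rfl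
    have hdl : ∀ j : Nat, 1 ≤ j → (j : Int) ≤ n →
        (sigmaA_inner n x dv st.1).getD j 0 = partSum x (m + 2) j := by
      intro j hj1 hjn
      rw [hinner_eq, hinner.2 j, ih2 j hj1 hjn]
      have hmem : ((j : Int) ∈ PySem.List.pyRange dv (n + 1) dv) ↔ (m + 2) ∣ j := by
        rw [mem_pyRange_mul dv n (j : Int) hdvpos]
        constructor
        · rintro ⟨h1, _, _⟩; rw [hdv] at h1; exact_mod_cast h1
        · intro h
          have hle : m + 2 ≤ j := Nat.le_of_dvd (by omega) h
          exact ⟨by rw [hdv]; exact_mod_cast h, by omega, hjn⟩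
      rw [show partSum x (m + 1 + 1) j = partSum x (m + 1) j +
            if (m + 2) ∣ j then ((m + 2 : Nat) : Int) ^ x.toNat else 0 from
          partSum_succ x (m + 1) j (by omega)]
      by_cases hd : (m + 2) ∣ j
      · rw [if_pos ((hmem).mpr hd), if_pos hd]
      · rw [if_neg (fun h => hd (hmem.mp h)), if_neg hd]
    have hlen' : (sigmaA_inner n x dv st.1).length = (n + 1).toNat := by
      rw [hinner_eq, hinner.1, ih1]
    refine ⟨?_, ?_, ?_⟩
    · rw [hstep]; exact hlen'
    · intro j hj1 hjn
      rw [hstep]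
      show (sigmaA_inner n x dv st.1).getD j 0 = partSum x (m + 1 + 1) j
      exact hdl j hj1 hjn
    · rw [hstep]
      show st.2 ++ [PySem.List.pyGetD (sigmaA_inner n x dv st.1) dv 0] = _
      have hyield : PySem.List.pyGetD (sigmaA_inner n x dv st.1) dv 0 = sigSpec x (m + 2) := by
        rw [PySem.List.pyGetD_of_nonneg _ _ (by omega : (0:Int) ≤ dv)]
        have : dv.toNat = m + 2 := by omega
        rw [this, hdl (m + 2) (by omega) (by omega), partSum_self x (m + 2) (by omega)]
      rw [hyield, ih3, List.range_succ, List.map_append]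
      simp

theorem A_eq_outSpec (n x : Int) (hn : 3 ≤ n) : sigmaList n x = outSpec n x := by
  rw [sigmaList, if_neg (by omega), if_neg (by omega), if_neg (by omega)]
  have hinit : PySem.List.pyGetD (List.replicate (n + 1).toNat (1 : Int)) 1 0 = 1 := by
    rw [show (1 : Int) = ((1 : Nat) : Int) from rfl, PySem.List.pyGetD_natCast,
      getD_replicate', if_pos (by omega)]
  simp only [hinit]
  rw [pyRange_two_eq n (by omega), List.foldl_map]
  have := (A_loop_inv n x hn ((n - 1).toNat) (by omega)).2.2
  rw [this]
  rw [outSpec, pyRange_two_eq n (by omega), List.map_map]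
  congr 1

-- invariant of B's smallest-prime-factor sieve
theorem spf_inv (n : Int) (hn : 2 ≤ n) :
    ∀ m : Nat, (m : Int) ≤ n - 1 →
    (((List.range m).foldl
        (fun spf k => if PySem.List.pyGetD spf ((k + 2 : Nat) : Int) 0 = 0
          then sigmaB_sieveInner n ((k + 2 : Nat) : Int) spf else spf)
        (List.replicate (n + 1).toNat 0)).length = (n + 1).toNat) ∧
    (∀ j : Nat, ((List.range m).foldl
        (fun spf k => if PySem.List.pyGetD spf ((k + 2 : Nat) : Int) 0 = 0
          then sigmaB_sieveInner n ((k + 2 : Nat) : Int) spf else spf)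
        (List.replicate (n + 1).toNat 0)).getD j 0 =
      if 2 ≤ j ∧ (j : Int) ≤ n ∧ j.minFac ≤ m + 1 then (j.minFac : Int) else 0) := by
  intro m
  induction m with
  | zero =>
    intro _
    refine ⟨by simp, fun j => ?_⟩
    simp only [List.range_zero, List.foldl_nil]
    rw [getD_replicate', ite_self]
    by_cases h2 : 2 ≤ j
    · have := (Nat.minFac_prime (show j ≠ 1 by omega)).two_le
      rw [if_neg (by omega)]
    · rw [if_neg (by omega)]
  | succ m ih =>
    intro hm
    obtain ⟨ih1, ih2⟩ := ih (by omega)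
    set a := (List.range m).foldl
        (fun spf k => if PySem.List.pyGetD spf ((k + 2 : Nat) : Int) 0 = 0
          then sigmaB_sieveInner n ((k + 2 : Nat) : Int) spf else spf)
        (List.replicate (n + 1).toNat 0) with ha
    have hstep : (List.range (m + 1)).foldl
        (fun spf k => if PySem.List.pyGetD spf ((k + 2 : Nat) : Int) 0 = 0
          then sigmaB_sieveInner n ((k + 2 : Nat) : Int) spf else spf)
        (List.replicate (n + 1).toNat 0) =
        (if PySem.List.pyGetD a ((m + 2 : Nat) : Int) 0 = 0
          then sigmaB_sieveInner n ((m + 2 : Nat) : Int) a else a) := by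
      rw [List.range_succ, List.foldl_append]
      simp [ha]
    have hpm2 := (Nat.minFac_prime (show (m + 2 : Nat) ≠ 1 by omega)).two_le
    have hcond : PySem.List.pyGetD a ((m + 2 : Nat) : Int) 0 =
        if (m + 2 : Nat).minFac ≤ m + 1 then ((m + 2 : Nat).minFac : Int) else 0 := by
      rw [PySem.List.pyGetD_natCast, ih2 (m + 2)]
      by_cases hmf : (m + 2 : Nat).minFac ≤ m + 1
      · rw [if_pos ⟨by omega, by omega, hmf⟩, if_pos hmf]
      · rw [if_neg (fun hh => hmf hh.2.2), if_neg hmf]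
    by_cases hsmall : (m + 2 : Nat).minFac ≤ m + 1
    · -- m+2 is composite: nothing changes
      have hne : PySem.List.pyGetD a ((m + 2 : Nat) : Int) 0 ≠ 0 := by
        rw [hcond, if_pos hsmall]
        exact_mod_cast (by omega : ((m + 2 : Nat).minFac : Int) ≠ 0)
      rw [hstep, if_neg hne]
      refine ⟨ih1, fun j => ?_⟩
      rw [ih2 j]
      by_cases hc : 2 ≤ j ∧ (j : Int) ≤ n
      · have hnotp : j.minFac ≠ m + 2 := by
          intro hmf
          have hjp : (m + 2 : Nat).Prime := hmf ▸ Nat.minFac_prime (show j ≠ 1 by omega)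
          have : (m + 2 : Nat).minFac = m + 2 := hjp.minFac_eq
          omega
        by_cases hle : j.minFac ≤ m + 1
        · rw [if_pos ⟨hc.1, hc.2, hle⟩, if_pos ⟨hc.1, hc.2, by omega⟩]
        · rw [if_neg (fun hh => hle hh.2.2), if_neg (fun hh => by
            have := hh.2.2; omega)]
      · rw [if_neg (fun hh => hc ⟨hh.1, hh.2.1⟩), if_neg (fun hh => hc ⟨hh.1, hh.2.1⟩)]
    · -- m+2 is prime (minFac (m+2) = m+2): run the inner marking loop
      have hmfeq : (m + 2 : Nat).minFac = m + 2 := by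
        have := Nat.minFac_le (show 0 < m + 2 by omega)
        omega
      have hz : PySem.List.pyGetD a ((m + 2 : Nat) : Int) 0 = 0 := by
        rw [hcond, if_neg hsmall]
      rw [hstep, if_pos hz]
      set pi : Int := ((m + 2 : Nat) : Int) with hpi
      have hpipos : (0 : Int) < pi := by omega
      have hinner := foldl_set_if pi (PySem.List.pyRange pi (n + 1) pi) a
        (by
          intro i hi
          rw [mem_pyRange_mul pi n i hpipos] at hi
          refine ⟨by omega, ?_⟩
          rw [ih1]; omega)
        (nodup_pyRange_of_pos pi (n + 1) pi hpipos)
      have hinner_eq : sigmaB_sieveInner n pi a =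
          (PySem.List.pyRange pi (n + 1) pi).foldl
            (fun a m => if PySem.List.pyGetD a m 0 = 0 then a.set m.toNat pi else a) a := rfl
      refine ⟨by rw [hinner_eq, hinner.1, ih1], fun j => ?_⟩
      rw [hinner_eq, hinner.2 j, ih2 j]
      have hmem : ((j : Int) ∈ PySem.List.pyRange pi (n + 1) pi) ↔
          ((m + 2) ∣ j ∧ m + 2 ≤ j ∧ (j : Int) ≤ n) := by
        rw [mem_pyRange_mul pi n (j : Int) hpipos, hpi]
        constructor
        · rintro ⟨h1, h2, h3⟩
          exact ⟨by exact_mod_cast h1, by omega, h3⟩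
        · rintro ⟨h1, h2, h3⟩
          exact ⟨by exact_mod_cast h1, by omega, h3⟩
      by_cases hjmem : (j : Int) ∈ PySem.List.pyRange pi (n + 1) pi
      · obtain ⟨hdvd, hjge, hjle⟩ := hmem.mp hjmem
        have hjmf : j.minFac ≤ m + 2 := Nat.minFac_le_of_dvd (by omega) hdvd
        by_cases hold : j.minFac ≤ m + 1
        · -- already marked
          rw [if_neg (show ¬ ((j:Int) ∈ _ ∧ _) from ?_), if_pos ⟨by omega, hjle, hold⟩,
            if_pos ⟨by omega, hjle, by omega⟩]
          rintro ⟨_, h0⟩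
          rw [if_pos ⟨by omega, hjle, hold⟩] at h0
          have := (Nat.minFac_prime (show j ≠ 1 by omega)).two_le
          omega
        · -- gets marked now: minFac j = m + 2
          have hjmf2 : j.minFac = m + 2 := by omega
          rw [if_pos ⟨hjmem, by rw [if_neg (fun hh => hold hh.2.2)]⟩,
            if_pos ⟨by omega, hjle, by omega⟩, hjmf2, hpi]
      · rw [if_neg (fun hh => hjmem hh.1)]
        by_cases hc : 2 ≤ j ∧ (j : Int) ≤ n ∧ j.minFac ≤ m + 1
        · rw [if_pos hc, if_pos ⟨hc.1, hc.2.1, by omega⟩]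
        · rw [if_neg hc, if_neg ?_]
          rintro ⟨hj2, hjn, hjmf⟩
          have hne : j.minFac ≠ m + 2 := by
            intro heq
            apply hjmem
            rw [hmem]
            have hd := heq ▸ Nat.minFac_dvd j
            exact ⟨hd, Nat.le_of_dvd (by omega) hd, hjn⟩
          exact hc ⟨hj2, hjn, by omega⟩

-- ---- B computes outSpec ----
-- coprime part (t with all factors minFac t removed) and sigma of the removed prime power
def cSpec (t : Nat) : Nat := t / t.minFac ^ t.factorization t.minFac
def gSpec (x : Int) (t : Nat) : Int := sigSpec x (t.minFac ^ t.factorization t.minFac)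

theorem sigSpec_one (x : Int) : sigSpec x 1 = 1 := by
  simp [sigSpec]

theorem jfacts (t : Nat) (ht : 2 ≤ t) :
    t.minFac ∣ t ∧ 2 ≤ t.minFac ∧ 1 ≤ t / t.minFac ∧ t / t.minFac < t ∧
      t.minFac * (t / t.minFac) = t := by
  have hp := Nat.minFac_prime (show t ≠ 1 by omega)
  have hd := Nat.minFac_dvd t
  have h2 := hp.two_le
  have hle := Nat.minFac_le (show 0 < t by omega)
  refine ⟨hd, h2, ?_, Nat.div_lt_self (by omega) (by omega), Nat.mul_div_cancel' hd⟩
  have := Nat.div_pos hle (by omega)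
  omega

theorem minFac_div_eq (t : Nat) (ht : 2 ≤ t) (hd : t.minFac ∣ t / t.minFac) :
    (t / t.minFac).minFac = t.minFac := by
  obtain ⟨_, h2, hj1, _, _⟩ := jfacts t ht
  have hj2 : 2 ≤ t / t.minFac := le_trans h2 (Nat.le_of_dvd (by omega) hd)
  apply le_antisymm
  · exact Nat.minFac_le_of_dvd h2 hd
  · have hjd : t / t.minFac ∣ t := Nat.div_dvd_of_dvd (Nat.minFac_dvd t)
    have hmm : (t / t.minFac).minFac ∣ t := (Nat.minFac_dvd _).trans hjd
    exact Nat.minFac_le_of_dvd (Nat.minFac_prime (show t / t.minFac ≠ 1 by omega)).two_le hmm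

theorem fact_split (t : Nat) (ht : 2 ≤ t) :
    t.factorization t.minFac = (t / t.minFac).factorization t.minFac + 1 := by
  obtain ⟨hd, h2, hj1, _, hmul⟩ := jfacts t ht
  have hp := Nat.minFac_prime (show t ≠ 1 by omega)
  have key : t.factorization t.minFac =
      (t.minFac.factorization + (t / t.minFac).factorization) t.minFac := by
    rw [← Nat.factorization_mul (by omega) (by omega), hmul]
  rw [key, Finsupp.add_apply, Nat.Prime.factorization_self hp]
  omega

theorem branch_true (x : Int) (t : Nat) (ht : 2 ≤ t) (hd : t.minFac ∣ t / t.minFac) :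
    cSpec t = cSpec (t / t.minFac) ∧
    gSpec x t = gSpec x (t / t.minFac) * ((t.minFac : Nat) : Int) ^ x.toNat + 1 := by
  obtain ⟨hdd, h2, hj1, _, hmul⟩ := jfacts t ht
  have hp := Nat.minFac_prime (show t ≠ 1 by omega)
  have hmf := minFac_div_eq t ht hd
  have he := fact_split t ht
  set p := t.minFac with hpdef
  set j := t / p with hjdef
  have hcs : cSpec t = cSpec j := by
    unfold cSpec
    rw [← hpdef, hmf, he, ← hmul, pow_succ']
    exact Nat.mul_div_mul_left j (p ^ (j.factorization p)) (show 0 < p by omega)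
  refine ⟨hcs, ?_⟩
  unfold gSpec
  rw [← hpdef, hmf, he, sigSpec_prime_pow_succ x p hp]

theorem branch_false (x : Int) (t : Nat) (ht : 2 ≤ t) (hnd : ¬ t.minFac ∣ t / t.minFac) :
    cSpec t = t / t.minFac ∧ gSpec x t = 1 + ((t.minFac : Nat) : Int) ^ x.toNat := by
  obtain ⟨hdd, h2, hj1, _, hmul⟩ := jfacts t ht
  have hp := Nat.minFac_prime (show t ≠ 1 by omega)
  have he := fact_split t ht
  have he0 : (t / t.minFac).factorization t.minFac = 0 :=
    Nat.factorization_eq_zero_of_not_dvd hnd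
  have he1 : t.factorization t.minFac = 1 := by omega
  refine ⟨?_, ?_⟩
  · unfold cSpec
    rw [he1, pow_one]
  · unfold gSpec
    rw [he1, pow_one, sigSpec_prime x t.minFac hp]

theorem cSpec_pos (t : Nat) (ht : 1 ≤ t) : 1 ≤ cSpec t :=
  Nat.ordCompl_pos t.minFac (by omega)

theorem sigSpec_split (x : Int) (t : Nat) (ht : 2 ≤ t) :
    sigSpec x t = sigSpec x (cSpec t) * gSpec x t :=
  sigSpec_mul_ordCompl x t ht

theorem spf_correct (n : Int) (hn : 2 ≤ n) :
    ∀ j : Nat, (sigmaB_spf n).getD j 0 =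
      if 2 ≤ j ∧ (j : Int) ≤ n then (j.minFac : Int) else 0 := by
  intro j
  have h := (spf_inv n hn (n - 1).toNat (by omega)).2 j
  have hL : sigmaB_spf n = (List.range ((n - 1).toNat)).foldl
      (fun spf k => if PySem.List.pyGetD spf ((k + 2 : Nat) : Int) 0 = 0
        then sigmaB_sieveInner n ((k + 2 : Nat) : Int) spf else spf)
      (List.replicate (n + 1).toNat 0) := by
    rw [sigmaB_spf, pyRange_two_eq n hn, List.foldl_map]
  rw [hL, h]
  by_cases hc : 2 ≤ j ∧ (j : Int) ≤ n
  · have hmf : j.minFac ≤ (n - 1).toNat + 1 :=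
      le_trans (Nat.minFac_le (by omega)) (by omega)
    rw [if_pos ⟨hc.1, hc.2, hmf⟩, if_pos hc]
  · rw [if_neg (fun hh => hc ⟨hh.1, hh.2.1⟩), if_neg hc]

theorem cSpec_le_div (t : Nat) (ht : 2 ≤ t) : cSpec t ≤ t / t.minFac := by
  obtain ⟨hd, h2, _, _, _⟩ := jfacts t ht
  have hp := Nat.minFac_prime (show t ≠ 1 by omega)
  have he : 0 < t.factorization t.minFac := hp.factorization_pos_of_dvd (by omega) hd
  have hle : t.minFac ≤ t.minFac ^ t.factorization t.minFac := by
    calc t.minFac = t.minFac ^ 1 := (pow_one _).symm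
    _ ≤ _ := Nat.pow_le_pow_right (by omega) he
  exact Nat.div_le_div_left hle (by omega)

-- the state of B's main loop after its first m iterations
def Bfold (n x : Int) (m : Nat) : List Int × List Int × List Int × List Int :=
  (List.range m).foldl (fun st k => sigmaB_step x (sigmaB_spf n) st ((k + 2 : Nat) : Int))
    ((List.replicate (n + 1).toNat (0 : Int)).set 1 1,
     List.replicate (n + 1).toNat (0 : Int),
     List.replicate (n + 1).toNat (0 : Int), ([0, 1] : List Int))

theorem B_loop_inv (n x : Int) (hn : 2 ≤ n) :
    ∀ m : Nat, (m : Int) ≤ n - 1 →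
    (Bfold n x m).1.length = (n + 1).toNat ∧
    (Bfold n x m).2.1.length = (n + 1).toNat ∧
    (Bfold n x m).2.2.1.length = (n + 1).toNat ∧
    (∀ t : Nat, 1 ≤ t → t ≤ m + 1 → (Bfold n x m).1.getD t 0 = sigSpec x t) ∧
    (∀ t : Nat, 2 ≤ t → t ≤ m + 1 →
      (Bfold n x m).2.1.getD t 0 = gSpec x t ∧
      (Bfold n x m).2.2.1.getD t 0 = ((cSpec t : Nat) : Int)) ∧
    (Bfold n x m).2.2.2 = [0, 1] ++ (List.range m).map (fun k => sigSpec x (k + 2)) := by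
  intro m
  induction m with
  | zero =>
    intro _
    refine ⟨by simp [Bfold], by simp [Bfold], by simp [Bfold], fun t ht1 ht2 => ?_,
      fun t ht1 ht2 => by omega, by simp [Bfold]⟩
    have ht : t = 1 := by omega
    subst ht
    show ((List.replicate (n + 1).toNat (0 : Int)).set 1 1).getD 1 0 = sigSpec x 1
    rw [getD_set_eq _ _ _ (by simp; omega), sigSpec_one]
  | succ m ih =>
    intro hm
    obtain ⟨ih1, ih2, ih3, ihsig, ihgc, ihout⟩ := ih (by omega)
    set B := Bfold n x m with hB
    have hstep : Bfold n x (m + 1) = sigmaB_step x (sigmaB_spf n) B ((m + 2 : Nat) : Int) := by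
      rw [Bfold, List.range_succ, List.foldl_append]
      simp [hB, Bfold]
    obtain ⟨hdd, hp2, hj1, hjlt, hmul⟩ := jfacts (m + 2) (by omega)
    have hprime := Nat.minFac_prime (show (m + 2 : Nat) ≠ 1 by omega)
    set pN := (m + 2 : Nat).minFac with hpN
    set jN := (m + 2) / pN with hjN
    have htn : ((m + 2 : Nat) : Int) ≤ n := by push_cast; omega
    have hjn : ((jN : Nat) : Int) ≤ n := by
      have : jN ≤ m + 2 := by omega
      push_cast; omega
    have hp2v : PySem.List.pyGetD (sigmaB_spf n) ((m + 2 : Nat) : Int) 0 = ((pN : Nat) : Int) := by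
      rw [PySem.List.pyGetD_natCast, spf_correct n hn (m + 2), if_pos ⟨by omega, htn⟩]
    have hfd : PySem.Int.floordiv ((m + 2 : Nat) : Int) ((pN : Nat) : Int) = ((jN : Nat) : Int) :=
      PySem.Int.floordiv_natCast (m + 2) pN
    have hjv : PySem.List.pyGetD (sigmaB_spf n) ((jN : Nat) : Int) 0 =
        if 2 ≤ jN ∧ (jN : Int) ≤ n then (jN.minFac : Int) else 0 := by
      rw [PySem.List.pyGetD_natCast, spf_correct n hn jN]
    have hcond_iff : (PySem.List.pyGetD (sigmaB_spf n) ((jN : Nat) : Int) 0 = ((pN : Nat) : Int)) ↔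
        pN ∣ jN := by
      rw [hjv]
      by_cases hj2 : 2 ≤ jN
      · rw [if_pos ⟨hj2, hjn⟩]
        constructor
        · intro h
          have hmf : jN.minFac = pN := by exact_mod_cast h
          exact hmf ▸ Nat.minFac_dvd jN
        · intro h
          exact_mod_cast congrArg (Nat.cast : Nat → Int) (minFac_div_eq (m + 2) (by omega) h)
      · have hj1' : jN = 1 := by omega
        rw [if_neg (fun hh => hj2 hh.1)]
        constructor
        · intro h; exfalso; omega
        · intro h; exfalso; rw [hj1'] at h; have := Nat.eq_one_of_dvd_one h; omega
    -- the values written at index m+2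
    have hkey : ∃ gi ci : Int, gi = gSpec x (m + 2) ∧ ci = ((cSpec (m + 2) : Nat) : Int) ∧
        sigmaB_step x (sigmaB_spf n) B ((m + 2 : Nat) : Int) =
          (B.1.set (m + 2) (PySem.List.pyGetD B.1 ci 0 * gi),
           B.2.1.set (m + 2) gi, B.2.2.1.set (m + 2) ci,
           B.2.2.2 ++ [PySem.List.pyGetD
             (B.1.set (m + 2) (PySem.List.pyGetD B.1 ci 0 * gi)) ((m + 2 : Nat) : Int) 0]) := by
      by_cases hdvd : pN ∣ jN
      · have hj2 : 2 ≤ jN := le_trans hp2 (Nat.le_of_dvd (by omega) hdvd)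
        have hjm : jN ≤ m + 1 := by omega
        obtain ⟨hgv, hcv⟩ := ihgc jN hj2 hjm
        obtain ⟨hcs, hgs⟩ := branch_true x (m + 2) (by omega) hdvd
        refine ⟨gSpec x (m + 2), ((cSpec (m + 2) : Nat) : Int), rfl, rfl, ?_⟩
        rw [sigmaB_step]
        simp only [hp2v, hfd]
        rw [if_pos (hcond_iff.mpr hdvd)]
        simp only [PySem.List.pyGetD_natCast, Int.toNat_natCast, hgv, hcv]
        rw [← hgs, ← hcs]
      · obtain ⟨hcs, hgs⟩ := branch_false x (m + 2) (by omega) hdvd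
        refine ⟨gSpec x (m + 2), ((cSpec (m + 2) : Nat) : Int), rfl, rfl, ?_⟩
        rw [sigmaB_step]
        simp only [hp2v, hfd]
        rw [if_neg (fun h => hdvd (hcond_iff.mp h))]
        simp only [PySem.List.pyGetD_natCast, Int.toNat_natCast]
        rw [hgs, hcs]
    obtain ⟨gi, ci, hgi, hci, hstep2⟩ := hkey
    -- the sigma value written is correct
    have hcle : cSpec (m + 2) ≤ m + 1 := le_trans (cSpec_le_div (m + 2) (by omega)) (by rw [← hpN, ← hjN]; omega)
    have hcpos : 1 ≤ cSpec (m + 2) := cSpec_pos (m + 2) (by omega)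
    have hsigc : PySem.List.pyGetD B.1 ci 0 = sigSpec x (cSpec (m + 2)) := by
      rw [hci, PySem.List.pyGetD_natCast]
      exact ihsig (cSpec (m + 2)) hcpos hcle
    have hval : PySem.List.pyGetD B.1 ci 0 * gi = sigSpec x (m + 2) := by
      rw [hsigc, hgi, ← sigSpec_split x (m + 2) (by omega)]
    have hlt : m + 2 < B.1.length := by rw [ih1]; omega
    refine ⟨?_, ?_, ?_, ?_, ?_, ?_⟩
    · rw [hstep, hstep2]; simpa using ih1
    · rw [hstep, hstep2]; simpa using ih2
    · rw [hstep, hstep2]; simpa using ih3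
    · intro t ht1 ht2
      rw [hstep, hstep2]
      show (B.1.set (m + 2) _).getD t 0 = _
      by_cases he : t = m + 2
      · rw [he, getD_set_eq _ _ _ hlt, hval]
      · rw [getD_set_ne _ _ _ _ he]
        exact ihsig t ht1 (by omega)
    · intro t ht1 ht2
      rw [hstep, hstep2]
      constructor
      · show (B.2.1.set (m + 2) gi).getD t 0 = _
        by_cases he : t = m + 2
        · rw [he, getD_set_eq _ _ _ (by rw [ih2]; omega), hgi]
        · rw [getD_set_ne _ _ _ _ he]
          exact (ihgc t ht1 (by omega)).1
      · show (B.2.2.1.set (m + 2) ci).getD t 0 = _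
        by_cases he : t = m + 2
        · rw [he, getD_set_eq _ _ _ (by rw [ih3]; omega), hci]
        · rw [getD_set_ne _ _ _ _ he]
          exact (ihgc t ht1 (by omega)).2
    · rw [hstep, hstep2]
      show B.2.2.2 ++ [_] = _
      have hyield : PySem.List.pyGetD
          (B.1.set (m + 2) (PySem.List.pyGetD B.1 ci 0 * gi)) ((m + 2 : Nat) : Int) 0 =
          sigSpec x (m + 2) := by
        rw [PySem.List.pyGetD_natCast, getD_set_eq _ _ _ hlt, hval]
      rw [hyield, ihout, List.range_succ, List.map_append]
      simp

theorem B_eq_outSpec (n x : Int) (hn : 2 ≤ n) : sigmaList_alt n x = outSpec n x := by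
  rw [sigmaList_alt]
  simp only [if_pos (show (1 : Int) ≤ n by omega), if_neg (show ¬ n ≤ 1 by omega)]
  rw [pyRange_two_eq n hn, List.foldl_map]
  have h := (B_loop_inv n x hn ((n - 1).toNat) (by omega)).2.2.2.2.2
  rw [show ((List.range ((n - 1).toNat)).foldl
      (fun st k => sigmaB_step x (sigmaB_spf n) st ((k + 2 : Nat) : Int))
      ((List.replicate (n + 1).toNat (0 : Int)).set 1 1,
       List.replicate (n + 1).toNat (0 : Int),
       List.replicate (n + 1).toNat (0 : Int), ([0, 1] : List Int))) = Bfold n x ((n - 1).toNat)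
    from rfl, h]
  rw [outSpec, pyRange_two_eq n hn, List.map_map]
  congr 1

-- ===== VERDICT (by name: the statement is the Claim_ definition above) =====
theorem sigmaList_spec : Claim_equal_sigmaList := by
  intro n x _ _
  unfold Spec_sigmaList
  rcases le_or_gt n 0 with h0 | h0
  · simp [sigmaList, sigmaList_alt, h0, show n ≤ 1 by omega, show ¬ (1 ≤ n) by omega]
  · rcases eq_or_lt_of_le (show (1:Int) ≤ n by omega) with h1 | h1
    · simp [sigmaList, sigmaList_alt, ← h1]
    · rcases eq_or_lt_of_le (show (2:Int) ≤ n by omega) with h2 | h2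
      · rw [B_eq_outSpec n x (by omega), ← h2]
        have hs : sigSpec x 2 = 1 + 2 ^ x.toNat := by
          have := sigSpec_prime x 2 Nat.prime_two; simpa using this
        rw [sigmaList, if_neg (by omega), if_neg (by omega), if_pos rfl]
        rw [outSpec, show PySem.List.pyRange (2:Int) (2 + 1) 1 = [2] from by decide]
        simp [hs]
      · rw [A_eq_outSpec n x (by omega), B_eq_outSpec n x (by omega)]
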